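-- pv_equiv track=rewrite | github.com/Tom-Drs/7wonders | player.py | put_with_resource
-- ===== SOURCE A (Python) =====
-- import copy
--
-- def put_with_resource(resource, cost):
--     cost_copy = copy.copy(cost)
--     for key, value in resource.items():
--         if cost_copy.get(key) != None:
--             cost_copy[key] -= value
--             if cost_copy[key] == 0:
--                 del cost_copy[key]
--     return cost_copy
-- ===== SOURCE B (Python) =====
-- def put_with_resource(resource, cost):
--     result = {}
--     for key, value in cost.items():
--         if key in resource:
--             remaining = value - resource[key]
--             if remaining != 0:
--                 result[key] = remaining
--         else:
--             result[key] = value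
--     return result
-- ===== Notes on version B (the rewrite author's own statement) =====
-- stated objective: simpler
-- what changed: B iterates over cost.items() once, building a fresh result dict (include key unless the subtracted value is zero), instead of mutating a shallow copy of cost while looping over resource with per-key get/assign/del.
import Mathlib
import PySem

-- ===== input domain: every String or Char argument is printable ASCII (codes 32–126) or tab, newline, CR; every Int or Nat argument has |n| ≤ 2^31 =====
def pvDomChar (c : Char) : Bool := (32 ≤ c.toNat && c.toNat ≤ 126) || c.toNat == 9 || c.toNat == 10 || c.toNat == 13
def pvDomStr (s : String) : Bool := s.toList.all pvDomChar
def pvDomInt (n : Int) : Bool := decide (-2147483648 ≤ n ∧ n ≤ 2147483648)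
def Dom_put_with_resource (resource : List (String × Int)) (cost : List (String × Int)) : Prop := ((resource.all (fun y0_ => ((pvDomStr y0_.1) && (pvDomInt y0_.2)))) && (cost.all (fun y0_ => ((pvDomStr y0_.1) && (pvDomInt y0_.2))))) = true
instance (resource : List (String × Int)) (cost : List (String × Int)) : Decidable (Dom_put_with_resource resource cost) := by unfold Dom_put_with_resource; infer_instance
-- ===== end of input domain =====

-- B builds a fresh result dict in one pass over cost instead of mutating a shallow copy of cost while looping over resource; objective: simpler.

-- ===== PORT A =====
-- the dict arguments arrive as association lists; Dict.ofList reconstructs the Python dict (last value wins, first position kept)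
def put_with_resource (resource : List (String × Int)) (cost : List (String × Int)) : List (String × Int) :=
  let rd := PySem.Dict.ofList resource
  let cost_copy := PySem.Dict.ofList cost          -- copy.copy(cost)
  (rd.items.foldl (fun c kv =>
      match c.get? kv.1 with                        -- cost_copy.get(key) != None
      | none => c
      | some cv =>
        let c' := c.insert kv.1 (cv - kv.2)         -- cost_copy[key] -= value
        if cv - kv.2 = 0 then c'.erase kv.1 else c' -- if cost_copy[key] == 0: del
    ) cost_copy).items

-- ===== PORT B =====
def put_with_resource_alt (resource : List (String × Int)) (cost : List (String × Int)) : List (String × Int) :=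
  let rd := PySem.Dict.ofList resource
  ((PySem.Dict.ofList cost).items.foldl (fun res kv =>
      match rd.get? kv.1 with                       -- key in resource / resource[key]
      | some rv =>
        let remaining := kv.2 - rv
        if remaining ≠ 0 then res.insert kv.1 remaining else res
      | none => res.insert kv.1 kv.2
    ) (PySem.Dict.empty : PySem.Dict String Int)).items

-- ===== PRECONDITION & SPEC =====
def Spec_put_with_resource (resource : List (String × Int)) (cost : List (String × Int)) (out : List (String × Int)) : Prop := out = put_with_resource_alt resource cost
instance (resource : List (String × Int)) (cost : List (String × Int)) (out : List (String × Int)) : Decidable (Spec_put_with_resource resource cost out) := by unfold Spec_put_with_resource; infer_instance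

-- ===== CLAIM (what is proved, stated in full; the proofs are below) =====
def Claim_equal_put_with_resource : Prop := ∀ (resource : List (String × Int)) (cost : List (String × Int)), Dom_put_with_resource resource cost → Spec_put_with_resource resource cost (put_with_resource resource cost)

-- ===== LEMMAS AND PROOFS =====

-- the per-cost-item contribution both loops realise, as a filterMap function (rd is the resource dict)
def pvContrib (rd : PySem.Dict String Int) (p : String × Int) : Option (String × Int) :=
  match rd.get? p.1 with
  | none => some p
  | some rv => if p.2 - rv = 0 then none else some (p.1, p.2 - rv)

theorem pvB_loop (cs : List (String × Int)) (rd : PySem.Dict String Int) :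
    ∀ (res : PySem.Dict String Int), (cs.map (·.1)).Nodup →
    (∀ p ∈ cs, res.contains p.1 = false) →
    (cs.foldl (fun res kv =>
      match rd.get? kv.1 with
      | some rv =>
        let remaining := kv.2 - rv
        if remaining ≠ 0 then res.insert kv.1 remaining else res
      | none => res.insert kv.1 kv.2) res).items
    = res.items ++ cs.filterMap (pvContrib rd) := by
  induction cs with
  | nil => intro res _ _; simp
  | cons kv rest ih =>
    obtain ⟨k, v⟩ := kv
    intro res hnd hc
    have hk1 : k ∉ rest.map (·.1) := (List.nodup_cons.mp hnd).1
    have hndr : (rest.map (·.1)).Nodup := (List.nodup_cons.mp hnd).2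
    have hres : res.contains k = false := hc (k, v) (by simp)
    have hfresh : ∀ (w : Int) (p : String × Int), p ∈ rest →
        (res.insert k w).contains p.1 = false := by
      intro w p hp
      rw [PySem.Dict.contains_insert]
      have : p.1 ≠ k := by
        intro h; exact hk1 (h ▸ List.mem_map_of_mem hp)
      simp [this, hc p (List.mem_cons_of_mem _ hp)]
    simp only [List.foldl_cons, List.filterMap_cons]
    cases hg : rd.get? k with
    | none =>
      simp only []
      rw [ih (res.insert k v) hndr (hfresh v),
          PySem.Dict.items_insert_of_not_contains _ _ hres]
      simp [pvContrib, hg]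
    | some rv =>
      simp only []
      by_cases hz : v - rv = 0
      · simp only [hz, ne_eq, not_true_eq_false, ite_false]
        rw [ih res hndr (fun p hp => hc p (List.mem_cons_of_mem _ hp))]
        simp [pvContrib, hg, hz]
      · simp only [ne_eq, hz, not_false_eq_true, ite_true]
        rw [ih (res.insert k (v - rv)) hndr (hfresh _),
            PySem.Dict.items_insert_of_not_contains _ _ hres]
        simp [pvContrib, hg, hz]


-- items of "insert an existing key k then erase k" = drop every entry with key k
theorem pvInsert_erase_items (c : PySem.Dict String Int) (k : String) (w : Int)
    (hco : c.contains k = true) :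
    ((c.insert k w).erase k).items = c.items.filter (fun p => !(p.1 == k)) := by
  simp only [PySem.Dict.erase, PySem.Dict.items_insert_of_contains _ _ hco]
  induction c.items with
  | nil => rfl
  | cons q t iht =>
    by_cases h : q.1 = k <;> simpa [h] using iht

theorem pvA_loop (rs : List (String × Int)) :
    ∀ (c : PySem.Dict String Int), (rs.map (·.1)).Nodup → c.keys.Nodup →
    (rs.foldl (fun c kv =>
      match c.get? kv.1 with
      | none => c
      | some cv =>
        let c' := c.insert kv.1 (cv - kv.2)
        if cv - kv.2 = 0 then c'.erase kv.1 else c') c).items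
    = c.items.filterMap (pvContrib (PySem.Dict.mk rs)) := by
  induction rs with
  | nil =>
    intro c _ _
    simp [pvContrib, PySem.Dict.get?]
  | cons kv rest ih =>
    obtain ⟨k, v⟩ := kv
    intro c hnd hck
    have hk1 : k ∉ rest.map (·.1) := (List.nodup_cons.mp hnd).1
    have hndr : (rest.map (·.1)).Nodup := (List.nodup_cons.mp hnd).2
    have hrest_none : (PySem.Dict.mk rest).get? k = none := by
      rw [PySem.Dict.get?_eq_none_iff_not_mem_keys]
      simpa [PySem.Dict.keys_mk] using hk1
    simp only [List.foldl_cons]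
    cases hg : c.get? k with
    | none =>
      rw [ih c hndr hck]
      apply List.filterMap_congr
      intro p hp
      have hne : p.1 ≠ k := by
        intro h
        have := PySem.Dict.get?_of_mem_items c (k := p.1) (v := p.2) (by simpa using hp) hck
        rw [h, hg] at this; simp at this
      simp [pvContrib, PySem.Dict.get?_mk_cons, Ne.symm hne]
    | some cv =>
      have hco : c.contains k = true := by
        rw [PySem.Dict.contains_eq_isSome_get?, hg]; rfl
      simp only []
      by_cases hz : cv - v = 0
      · rw [if_pos hz]
        have hitems := pvInsert_erase_items c k (cv - v) hco
        have hkeys : ((c.insert k (cv - v)).erase k).keys.Nodup := by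
          have heq : ((c.insert k (cv - v)).erase k).keys
              = (c.items.filter (fun p => !(p.1 == k))).map (·.1) := by
            simp only [PySem.Dict.keys, hitems]
          rw [heq]
          have hsub : List.Sublist ((c.items.filter (fun p => !(p.1 == k))).map (·.1))
              (c.items.map (·.1)) :=
            List.Sublist.map _ List.filter_sublist
          exact ((by simpa [PySem.Dict.keys] using hck : (c.items.map (·.1)).Nodup)).sublist hsub
        rw [ih _ hndr hkeys, hitems, List.filterMap_filter]
        apply List.filterMap_congr
        intro p hp
        by_cases hne : p.1 = k
        · have hv : p.2 = cv := by
            have := PySem.Dict.get?_of_mem_items c (k := p.1) (v := p.2) (by simpa using hp) hck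
            rw [hne, hg] at this
            exact (Option.some.inj this).symm
          simp [pvContrib, PySem.Dict.get?_mk_cons, hne, hv, hz]
        · simp [pvContrib, PySem.Dict.get?_mk_cons, hne, Ne.symm hne]
      · rw [if_neg hz]
        have hkeys : (c.insert k (cv - v)).keys.Nodup := by
          rw [PySem.Dict.keys_insert_of_contains _ _ hco]; exact hck
        rw [ih _ hndr hkeys, PySem.Dict.items_insert_of_contains _ _ hco,
            List.filterMap_map]
        apply List.filterMap_congr
        intro p hp
        by_cases hne : p.1 = k
        · have hv : p.2 = cv := by
            have := PySem.Dict.get?_of_mem_items c (k := p.1) (v := p.2) (by simpa using hp) hck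
            rw [hne, hg] at this
            exact (Option.some.inj this).symm
          simp [pvContrib, Function.comp, hne, PySem.Dict.get?_mk_cons, hrest_none, hv, hz]
        · simp [pvContrib, Function.comp, hne, Ne.symm hne, PySem.Dict.get?_mk_cons]

-- ===== VERDICT (by name: the statement is the Claim_ definition above) =====
theorem put_with_resource_spec : Claim_equal_put_with_resource := by
  intro resource cost _
  unfold Spec_put_with_resource put_with_resource put_with_resource_alt
  have hA := pvA_loop (PySem.Dict.ofList resource).items (PySem.Dict.ofList cost)
    (by simpa [PySem.Dict.keys] using PySem.Dict.nodup_keys_ofList resource)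
    (PySem.Dict.nodup_keys_ofList cost)
  have hB := pvB_loop (PySem.Dict.ofList cost).items (PySem.Dict.ofList resource)
    (PySem.Dict.empty)
    (by simpa [PySem.Dict.keys] using PySem.Dict.nodup_keys_ofList cost)
    (by intro p _; simp [PySem.Dict.contains_empty])
  rw [hA, hB]
  simp [PySem.Dict.empty]
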